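-- pv_equiv track=rewrite | github.com/bucs110FALL22/portfolio-kweng2bing | ch06/midterm/midterm.py | topos
-- ===== SOURCE A (Python) =====
-- def topos(input):
--   # A function used to translate a1...c3 to coordinates. The function takes in the user input and returns the coordinates for that particular input.
--   dict = [
--   ["a1", (-100,60)],
--   ["a2", (0, 60)],
--   ["a3", (100, 60)],
--   ["b1", (-100, -40)],
--   ["b2", (0,-40)],
--   ["b3", (100, -40)],
--   ["c1", (-100, -140)],
--   ["c2", (0, -140)],
--   ["c3", (100, -140)]
-- ]
--   for posarg in dict:
--     if posarg[0] == input: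
--       return posarg[1]
-- ===== SOURCE B (Python) =====
-- def topos(input):
--   # Closed-form arithmetic mapping of the 3x3 grid instead of a table scan.
--   if not isinstance(input, str) or len(input) != 2:
--     return None
--   r, c = input
--   if r < 'a' or r > 'c' or c < '1' or c > '3':
--     return None
--   return ((ord(c) - ord('2')) * 100, 60 - (ord(r) - ord('a')) * 100)
-- ===== Notes on version B (the rewrite author's own statement) =====
-- stated objective: simpler
-- what changed: Replaced the 9-entry lookup table and linear scan with a closed-form arithmetic formula derived from the grid layout (x from the digit, y from the letter), after a range check.
import Mathlib
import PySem

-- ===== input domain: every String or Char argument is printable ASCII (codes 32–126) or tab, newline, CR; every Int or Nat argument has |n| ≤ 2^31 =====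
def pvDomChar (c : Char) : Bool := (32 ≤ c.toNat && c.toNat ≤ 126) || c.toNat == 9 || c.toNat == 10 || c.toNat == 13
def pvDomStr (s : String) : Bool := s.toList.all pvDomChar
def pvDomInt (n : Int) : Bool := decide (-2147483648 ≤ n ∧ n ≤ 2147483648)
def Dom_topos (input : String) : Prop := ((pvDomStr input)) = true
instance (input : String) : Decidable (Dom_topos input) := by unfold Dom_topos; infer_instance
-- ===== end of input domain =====

-- B replaces A's 9-entry table scan by a closed-form arithmetic mapping from the grid layout (simpler; same O(1) cost).
set_option maxHeartbeats 1000000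


-- ===== PORT A =====
-- the literal table from A ("dict")
def toposTable : List (String × (Int × Int)) :=
  [("a1", (-100, 60)), ("a2", (0, 60)), ("a3", (100, 60)),
   ("b1", (-100, -40)), ("b2", (0, -40)), ("b3", (100, -40)),
   ("c1", (-100, -140)), ("c2", (0, -140)), ("c3", (100, -140))]

-- A's for-loop with early return: scan for the first key equal to input
def toposScan (l : List (String × (Int × Int))) (input : String) : Option (Int × Int) :=
  match l with
  | [] => none
  | posarg :: rest => if posarg.1 == input then some posarg.2 else toposScan rest input

def topos (input : String) : Option (Int × Int) := toposScan toposTable input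

-- ===== PORT B =====
def topos_alt (input : String) : Option (Int × Int) :=
  match input.toList with
  | [r, c] =>
      if r < 'a' ∨ r > 'c' ∨ c < '1' ∨ c > '3' then none
      else some (((c.toNat : Int) - ('2'.toNat : Int)) * 100,
                 60 - ((r.toNat : Int) - ('a'.toNat : Int)) * 100)
  | _ => none

-- ===== PRECONDITION & SPEC =====
def Spec_topos (input : String) (out : Option (Int × Int)) : Prop := out = topos_alt input
instance (input : String) (out : Option (Int × Int)) : Decidable (Spec_topos input out) := by unfold Spec_topos; infer_instance

-- ===== CLAIM (what is proved, stated in full; the proofs are below) =====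
def Claim_equal_topos : Prop := ∀ (input : String), Dom_topos input → Spec_topos input (topos input)

-- ===== LEMMAS AND PROOFS =====
theorem char_eq_of_toNat (r s : Char) (h : r.val.toNat = s.val.toNat) : r = s :=
  Char.ext (UInt32.toNat_inj.mp h)

theorem str_eq_of_toList (s : String) (l : List Char) (h : s.toList = l) :
    s = String.ofList l := by
  have := congrArg String.ofList h
  simpa using this

theorem char_row_cases (r : Char) (h1 : 'a' ≤ r) (h2 : r ≤ 'c') :
    r = 'a' ∨ r = 'b' ∨ r = 'c' := by
  rw [Char.le_def] at h1 h2
  have h3 : 97 ≤ r.val.toNat := h1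
  have h4 : r.val.toNat ≤ 99 := h2
  have h5 : r.val.toNat = 97 ∨ r.val.toNat = 98 ∨ r.val.toNat = 99 := by omega
  rcases h5 with h | h | h
  · exact Or.inl (char_eq_of_toNat r 'a' h)
  · exact Or.inr (Or.inl (char_eq_of_toNat r 'b' h))
  · exact Or.inr (Or.inr (char_eq_of_toNat r 'c' h))

theorem char_col_cases (c : Char) (h1 : '1' ≤ c) (h2 : c ≤ '3') :
    c = '1' ∨ c = '2' ∨ c = '3' := by
  rw [Char.le_def] at h1 h2
  have h3 : 49 ≤ c.val.toNat := h1
  have h4 : c.val.toNat ≤ 51 := h2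
  have h5 : c.val.toNat = 49 ∨ c.val.toNat = 50 ∨ c.val.toNat = 51 := by omega
  rcases h5 with h | h | h
  · exact Or.inl (char_eq_of_toNat c '1' h)
  · exact Or.inr (Or.inl (char_eq_of_toNat c '2' h))
  · exact Or.inr (Or.inr (char_eq_of_toNat c '3' h))

-- ===== VERDICT (by name: the statement is the Claim_ definition above) =====
theorem topos_spec : Claim_equal_topos := by
  unfold Claim_equal_topos Spec_topos
  intro input hdom
  match hl : input.toList with
  | [r, c] =>
    by_cases hin : ('a' ≤ r ∧ r ≤ 'c') ∧ ('1' ≤ c ∧ c ≤ '3')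
    · obtain ⟨⟨hr1, hr2⟩, hc1, hc2⟩ := hin
      rcases char_row_cases r hr1 hr2 with rfl | rfl | rfl <;>
        rcases char_col_cases c hc1 hc2 with rfl | rfl | rfl <;>
        · rw [str_eq_of_toList input _ hl]; decide
    · have halt : topos_alt input = none := by
        have hg : r < 'a' ∨ r > 'c' ∨ c < '1' ∨ c > '3' := by
          by_cases ha : 'a' ≤ r
          · by_cases hb : r ≤ 'c'
            · by_cases hc : '1' ≤ c
              · by_cases hd : c ≤ '3'
                · exact absurd ⟨⟨ha, hb⟩, hc, hd⟩ hin
                · exact Or.inr (Or.inr (Or.inr (lt_of_not_ge hd)))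
              · exact Or.inr (Or.inr (Or.inl (lt_of_not_ge hc)))
            · exact Or.inr (Or.inl (lt_of_not_ge hb))
          · exact Or.inl (lt_of_not_ge ha)
        unfold topos_alt
        rw [hl]
        exact if_pos hg
      rw [halt]
      simp only [topos, toposTable, toposScan, beq_iff_eq]
      split_ifs <;>
        first
        | rfl
        | · rw [← ‹_ = input›] at hl
            simp at hl
            obtain ⟨e1, e2⟩ := hl
            subst e1; subst e2
            exact absurd (by decide) hin
  | [] =>
    have halt : topos_alt input = none := by unfold topos_alt; rw [hl]
    rw [halt]
    simp only [topos, toposTable, toposScan, beq_iff_eq]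
    split_ifs <;>
      first
      | rfl
      | · rw [← ‹_ = input›] at hl; simp at hl
  | [x] =>
    have halt : topos_alt input = none := by unfold topos_alt; rw [hl]
    rw [halt]
    simp only [topos, toposTable, toposScan, beq_iff_eq]
    split_ifs <;>
      first
      | rfl
      | · rw [← ‹_ = input›] at hl; simp at hl
  | x :: y :: z :: t =>
    have halt : topos_alt input = none := by unfold topos_alt; rw [hl]
    rw [halt]
    simp only [topos, toposTable, toposScan, beq_iff_eq]
    split_ifs <;>
      first
      | rfl
      | · rw [← ‹_ = input›] at hl; simp at hl
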